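-- pv_equiv track=rewrite | github.com/quiznat/tot-hf-survey-artifacts | phase2/code/src/phase2_baselines/runners/tot.py | _extract_marked_answer
-- ===== SOURCE A (Python) =====
-- def _extract_marked_answer(thought_state: str) -> str:
--     lines = [line.strip() for line in thought_state.splitlines() if line.strip()]
--     for line in reversed(lines):
--         upper = line.upper()
--         if upper.startswith("FINAL:"):
--             return line.split(":", 1)[1].strip()
--         if upper.startswith("ANSWER:"):
--             return line.split(":", 1)[1].strip()
--         if upper.startswith("SOLUTION:"):
--             return line.split(":", 1)[1].strip()
--     return ""
-- ===== SOURCE B (Python) =====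
-- def _extract_marked_answer(thought_state: str) -> str:
--     result = ""
--     for raw in thought_state.splitlines():
--         line = raw.strip()
--         if line.upper().startswith(("FINAL:", "ANSWER:", "SOLUTION:")):
--             result = line.split(":", 1)[1].strip()
--     return result
-- ===== Notes on version B (the rewrite author's own statement) =====
-- stated objective: simpler
-- what changed: Replaces the filter-then-reverse-then-early-return scan with a single forward pass over raw lines that overwrites an accumulator on each marked line, returning the last match.
import Mathlib
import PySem

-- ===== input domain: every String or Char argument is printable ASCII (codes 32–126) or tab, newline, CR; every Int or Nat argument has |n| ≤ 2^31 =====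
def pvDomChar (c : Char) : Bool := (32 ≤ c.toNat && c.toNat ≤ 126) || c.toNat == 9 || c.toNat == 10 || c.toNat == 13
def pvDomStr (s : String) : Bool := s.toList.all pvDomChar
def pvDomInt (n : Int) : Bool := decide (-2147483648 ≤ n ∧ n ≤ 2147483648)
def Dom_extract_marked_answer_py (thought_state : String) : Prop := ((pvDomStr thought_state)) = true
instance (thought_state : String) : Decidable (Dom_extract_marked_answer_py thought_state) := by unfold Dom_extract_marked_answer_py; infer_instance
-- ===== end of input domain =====

-- ===== PORT A =====
-- shared helper: line.split(":", 1)[1].strip()  (the index exists whenever the line contains ':')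
def markedVal (line : String) : String :=
  PySem.Str.strip ((PySem.List.pyGet? ((PySem.Str.splitMax? line ":" 1).getD []) 1).getD "")

-- literal port of A's reversed early-return loop
def goA : List String → String
  | [] => ""
  | line :: rest =>
    if PySem.Str.startswith (PySem.Str.upper line) "FINAL:" then markedVal line
    else if PySem.Str.startswith (PySem.Str.upper line) "ANSWER:" then markedVal line
    else if PySem.Str.startswith (PySem.Str.upper line) "SOLUTION:" then markedVal line
    else goA rest

def extract_marked_answer_py (thought_state : String) : String :=
  goA ((((PySem.Str.splitlines thought_state).map PySem.Str.strip).filter (fun l => l != "")).reverse)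

-- ===== PORT B =====
-- B: one forward pass over raw lines, overwriting an accumulator on marked lines
def isMarked (line : String) : Bool :=
  ["FINAL:", "ANSWER:", "SOLUTION:"].any (fun p => PySem.Str.startswith (PySem.Str.upper line) p)

def extract_marked_answer_py_alt (thought_state : String) : String :=
  (PySem.Str.splitlines thought_state).foldl
    (fun result raw =>
      let line := PySem.Str.strip raw
      if isMarked line then markedVal line else result) ""

-- ===== PRECONDITION & SPEC =====
def Spec_extract_marked_answer_py (thought_state : String) (out : String) : Prop := out = extract_marked_answer_py_alt thought_state
instance (thought_state : String) (out : String) : Decidable (Spec_extract_marked_answer_py thought_state out) := by unfold Spec_extract_marked_answer_py; infer_instance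

-- ===== CLAIM (what is proved, stated in full; the proofs are below) =====
def Claim_equal_extract_marked_answer_py : Prop := ∀ (thought_state : String), Dom_extract_marked_answer_py thought_state → Spec_extract_marked_answer_py thought_state (extract_marked_answer_py thought_state)

-- ===== LEMMAS AND PROOFS =====

-- goA with an explicit default accumulator (proof helper)
def goAcc : List String → String → String
  | [], acc => acc
  | line :: rest, acc => if isMarked line then markedVal line else goAcc rest acc

theorem goA_eq_goAcc (xs : List String) : goA xs = goAcc xs "" := by
  induction xs with
  | nil => rfl
  | cons l rest ih =>
    simp only [goA, goAcc, isMarked, List.any, Bool.or_false, Bool.or_eq_true]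
    split_ifs with h1 h2 h3 h4 <;> simp_all

theorem goAcc_append (xs : List String) (x : String) (acc : String) :
    goAcc (xs ++ [x]) acc = goAcc xs (if isMarked x then markedVal x else acc) := by
  induction xs generalizing acc with
  | nil => rfl
  | cons y ys ih => simp only [List.cons_append, goAcc, ih]

theorem isMarked_empty : isMarked "" = false := by decide

theorem key (L : List String) (acc : String) :
    L.foldl (fun result raw =>
        let line := PySem.Str.strip raw
        if isMarked line then markedVal line else result) acc
      = goAcc (((L.map PySem.Str.strip).filter (fun l => l != "")).reverse) acc := by
  induction L generalizing acc with
  | nil => rfl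
  | cons raw rest ih =>
    simp only [List.foldl_cons, List.map_cons, List.filter_cons]
    by_cases h : PySem.Str.strip raw = ""
    · simp [h, ih, isMarked_empty]
    · have h' : (PySem.Str.strip raw != "") = true := by simpa using h
      simp only [h', if_pos, List.reverse_cons, ih, goAcc_append]

-- ===== VERDICT (by name: the statement is the Claim_ definition above) =====
theorem extract_marked_answer_py_spec : Claim_equal_extract_marked_answer_py := by
  intro s _
  unfold Spec_extract_marked_answer_py extract_marked_answer_py extract_marked_answer_py_alt
  rw [goA_eq_goAcc, key]
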